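-- pv_equiv track=rewrite | github.com/eduardoleon9010/python_en_accion | scripts/tupla/sharpening.py | sharpening
-- ===== SOURCE A (Python) =====
-- def copiar_imagen(imagen: list) -> list:
--     """
--     Crea una copia de una imagen y la retorna.
--
--     Args:
--         imagen (list): Una lista de listas de tuplas que representa una imagen.
--
--     Returns:
--         list: Una copia de la imagen.
--     """
--     copia = []
--     alto = len(imagen)
--     for i in range(0, alto):
--         fila = imagen[i]
--         nueva_fila = fila.copy()
--         copia.append(nueva_fila)
--     return copia
--
-- def sharpening(imagen: list) -> list:
--     """
--     Aplica un filtro de afilado (sharpening) sobre la imagen.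
--
--     Args:
--         imagen (list): La imagen sobre la que se aplicará el filtro.
--
--     Returns:
--         list: La imagen con el resultado de aplicar el filtro de afilado.
--     """
--     # Se define la máscara de afilado
--     mascara = [[-1, -1, -1],
--                [-1, 9, -1],
--                [-1, -1, -1]]
--
--     # Se crea una copia de la imagen original
--     copia = copiar_imagen(imagen)
--     alto = len(imagen)
--     ancho = len(imagen[0])
--
--     # Se itera sobre los píxeles de la imagen
--     for i in range(1, alto-1):
--         for j in range(1, ancho-1):
--             rojo, verde, azul = (0, 0, 0)
--
--             # Se aplica la máscara de afilado al píxel actual y sus vecinos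
--             for i_mascara in range(-1, 2):
--                 for j_mascara in range(-1, 2):
--                     rojo_vecino, verde_vecino, azul_vecino = imagen[i+i_mascara][j+j_mascara]
--                     valor_mascara = mascara[i_mascara+1][j_mascara+1]
--
--                     rojo += rojo_vecino * valor_mascara
--                     verde += verde_vecino * valor_mascara
--                     azul += azul_vecino * valor_mascara
--
--             nuevo_pixel = (max(rojo, 0), max(verde, 0), max(azul, 0))
--             copia[i][j] = nuevo_pixel
--
--     return copia
-- ===== SOURCE B (Python) =====
-- def sharpening(imagen: list) -> list:
--     """Sharpening via precomputed vertical column sums: per interior pixel the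
--     new value is max(10*center - 3x3 window sum, 0), border rows/cols copied."""
--     alto = len(imagen)
--     ancho = len(imagen[0])
--     salida = [list(fila) for fila in imagen]
--     for i in range(1, alto - 1):
--         arriba, medio, abajo = imagen[i - 1], imagen[i], imagen[i + 1]
--         cols = [(a[0] + m[0] + b[0], a[1] + m[1] + b[1], a[2] + m[2] + b[2])
--                 for a, m, b in zip(arriba, medio, abajo)]
--         fila_s = salida[i]
--         for j in range(1, ancho - 1):
--             r0, g0, b0 = cols[j - 1]
--             r1, g1, b1 = cols[j]
--             r2, g2, b2 = cols[j + 1]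
--             cr, cg, cb = medio[j]
--             fila_s[j] = (max(10 * cr - (r0 + r1 + r2), 0),
--                          max(10 * cg - (g0 + g1 + g2), 0),
--                          max(10 * cb - (b0 + b1 + b2), 0))
--     return salida
-- ===== Notes on version B (the rewrite author's own statement) =====
-- stated objective: faster
-- what changed: Replaces the mask-table triple loop over a mutated copy by a separable pass: per interior row it precomputes vertical three-row column sums once (each shared by three neighbouring pixels), then each pixel is max(10*center - sum of three adjacent column sums, 0), written into freshly built rows.
import Mathlib
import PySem

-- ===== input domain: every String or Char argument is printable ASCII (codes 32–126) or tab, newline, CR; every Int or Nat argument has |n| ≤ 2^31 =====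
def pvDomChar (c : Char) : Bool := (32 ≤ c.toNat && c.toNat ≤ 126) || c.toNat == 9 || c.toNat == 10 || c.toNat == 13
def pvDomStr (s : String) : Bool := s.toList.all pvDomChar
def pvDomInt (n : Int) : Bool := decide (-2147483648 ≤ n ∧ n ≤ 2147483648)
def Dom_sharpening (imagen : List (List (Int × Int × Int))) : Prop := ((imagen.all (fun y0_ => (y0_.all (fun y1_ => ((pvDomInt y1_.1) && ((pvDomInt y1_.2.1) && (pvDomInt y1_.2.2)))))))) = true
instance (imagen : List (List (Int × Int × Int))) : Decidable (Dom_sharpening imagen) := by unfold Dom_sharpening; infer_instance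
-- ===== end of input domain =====

-- B replaces the mask-table triple loop (copy then mutate) by a separable pass: per interior
-- row it precomputes vertical three-row column sums once, then each pixel is
-- max(10*center - (sum of three adjacent column sums), 0); borders are the copied originals.

-- ===== PORT A =====
def pvMascara : List (List Int) := [[-1, -1, -1], [-1, 9, -1], [-1, -1, -1]]

def copiar_imagen (imagen : List (List (Int × Int × Int))) : List (List (Int × Int × Int)) :=
  (PySem.List.pyRange 0 (PySem.List.len imagen) 1).foldl
    (fun copia i => copia ++ [PySem.List.pyGetD imagen i []]) []

-- the innermost double mask loop of A (accumulates (rojo, verde, azul) from (0,0,0))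
def pvPixelA (imagen : List (List (Int × Int × Int))) (i j : Int) : Int × Int × Int :=
  (PySem.List.pyRange (-1) 2 1).foldl (fun acc im =>
    (PySem.List.pyRange (-1) 2 1).foldl (fun acc jm =>
      let p := PySem.List.pyGetD (PySem.List.pyGetD imagen (i + im) []) (j + jm) (0, 0, 0)
      let v := PySem.List.pyGetD (PySem.List.pyGetD pvMascara (im + 1) []) (jm + 1) 0
      (acc.1 + p.1 * v, acc.2.1 + p.2.1 * v, acc.2.2 + p.2.2 * v)) acc) (0, 0, 0)

def sharpening (imagen : List (List (Int × Int × Int))) : List (List (Int × Int × Int)) :=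
  let copia := copiar_imagen imagen
  let alto := PySem.List.len imagen
  let ancho := PySem.List.len (PySem.List.pyGetD imagen 0 [])
  (PySem.List.pyRange 1 (alto - 1) 1).foldl (fun copia i =>
    (PySem.List.pyRange 1 (ancho - 1) 1).foldl (fun copia j =>
      let rgb := pvPixelA imagen i j
      let nuevo := (max rgb.1 0, max rgb.2.1 0, max rgb.2.2 0)
      PySem.List.pySetD copia i (PySem.List.pySetD (PySem.List.pyGetD copia i []) j nuevo))
      copia) copia

-- ===== PORT B =====
def pvColSums (arriba medio abajo : List (Int × Int × Int)) : List (Int × Int × Int) :=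
  (arriba.zip (medio.zip abajo)).map (fun t =>
    (t.1.1 + t.2.1.1 + t.2.2.1, t.1.2.1 + t.2.1.2.1 + t.2.2.2.1, t.1.2.2 + t.2.1.2.2 + t.2.2.2.2))

def sharpening_alt (imagen : List (List (Int × Int × Int))) : List (List (Int × Int × Int)) :=
  let alto := PySem.List.len imagen
  let ancho := PySem.List.len (PySem.List.pyGetD imagen 0 [])
  let salida := imagen.map (fun fila => fila)
  (PySem.List.pyRange 1 (alto - 1) 1).foldl (fun salida i =>
    let arriba := PySem.List.pyGetD imagen (i - 1) []
    let medio := PySem.List.pyGetD imagen i []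
    let abajo := PySem.List.pyGetD imagen (i + 1) []
    let cols := pvColSums arriba medio abajo
    let nueva := (PySem.List.pyRange 1 (ancho - 1) 1).foldl (fun fila j =>
      let c0 := PySem.List.pyGetD cols (j - 1) (0, 0, 0)
      let c1 := PySem.List.pyGetD cols j (0, 0, 0)
      let c2 := PySem.List.pyGetD cols (j + 1) (0, 0, 0)
      let m := PySem.List.pyGetD medio j (0, 0, 0)
      PySem.List.pySetD fila j
        (max (10 * m.1 - (c0.1 + c1.1 + c2.1)) 0,
         max (10 * m.2.1 - (c0.2.1 + c1.2.1 + c2.2.1)) 0,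
         max (10 * m.2.2 - (c0.2.2 + c1.2.2 + c2.2.2)) 0))
      (PySem.List.pyGetD salida i [])
    PySem.List.pySetD salida i nueva) salida

-- ===== PRECONDITION & SPEC =====
-- Pre_ is exactly where A returns: a nonempty image (imagen[0] raises IndexError on []), and —
-- only when there are interior pixels (height ≥ 3 and width ≥ 3) — every row at least as long
-- as the first one, since A reads columns 0..ancho-1 of every row and raises IndexError otherwise.
def Pre_sharpening (imagen : List (List (Int × Int × Int))) : Prop :=
  imagen ≠ [] ∧
    (3 ≤ imagen.length ∧ 3 ≤ (imagen.getD 0 []).length →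
      ∀ fila ∈ imagen, (imagen.getD 0 []).length ≤ fila.length)
instance (imagen : List (List (Int × Int × Int))) : Decidable (Pre_sharpening imagen) := by
  unfold Pre_sharpening; infer_instance

def pvWitness_sharpening : (List (List (Int × Int × Int))) :=
  [[(1, 2, 3), (4, 5, 6), (7, 8, 9)],
   [(9, 8, 7), (100, 5, 4), (3, 2, 1)],
   [(0, 0, 0), (1, 1, 1), (2, 2, 2)]]

def Spec_sharpening (imagen : List (List (Int × Int × Int))) (out : List (List (Int × Int × Int))) : Prop := out = sharpening_alt imagen
instance (imagen : List (List (Int × Int × Int))) (out : List (List (Int × Int × Int))) : Decidable (Spec_sharpening imagen out) := by unfold Spec_sharpening; infer_instance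

-- ===== CLAIM (what is proved, stated in full; the proofs are below) =====
def Claim_equal_sharpening : Prop := ∀ (imagen : List (List (Int × Int × Int))), Dom_sharpening imagen → Pre_sharpening imagen → Spec_sharpening imagen (sharpening imagen)

-- ===== LEMMAS AND PROOFS =====

-- folding 'c[i] = h(i, c[i])' over range(a, b) is a positional map
lemma pv_foldl_update {α : Type} (d : α) (h : Int → α → α) (b : Int) (l : List α)
    (a : Int) (ha : 0 ≤ a) :
    (PySem.List.pyRange a b 1).foldl
        (fun c i => PySem.List.pySetD c i (h i (PySem.List.pyGetD c i d))) l
      = l.mapIdx (fun i x => if a ≤ (i : Int) ∧ (i : Int) < b then h i x else x) := by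
  obtain ⟨n, hn⟩ : ∃ n, (b - a).toNat = n := ⟨_, rfl⟩
  induction n generalizing a l with
  | zero =>
    rw [PySem.List.pyRange_one_eq_nil (by omega)]
    refine (List.ext_getElem (by simp) ?_).symm
    intro k h1 h2
    simp only [List.getElem_mapIdx, List.foldl_nil]
    rw [if_neg (by omega)]
  | succ n ih =>
    obtain ⟨m, rfl⟩ : ∃ m : Nat, a = (m : Int) := ⟨a.toNat, by omega⟩
    have hmb : (m : Int) < b := by omega
    rw [PySem.List.pyRange_one_cons (by omega), List.foldl_cons]
    simp only [PySem.List.pySetD_natCast, PySem.List.pyGetD_natCast]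
    have h1 : ((m : Int) + 1) = ((m + 1 : Nat) : Int) := by push_cast; ring
    rw [h1, ih _ _ (by omega) (by omega)]
    refine List.ext_getElem (by simp) ?_
    intro k hk1 hk2
    simp only [List.getElem_mapIdx, List.length_mapIdx] at hk1 hk2 ⊢
    have hkl : k < l.length := by simpa using hk2
    by_cases hkm : k = m
    · subst hkm
      have hA : ¬((((k + 1 : Nat)) : Int) ≤ ((k : Nat) : Int) ∧ (((k : Nat)) : Int) < b) := by omega
      simp [hmb, List.getElem?_eq_getElem hkl]
    · simp only [List.getElem_set, if_neg (Ne.symm hkm)]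
      split_ifs with h1 h2 <;> first | rfl | omega

-- the inner loop of A only rewrites row m: it factors through that row
lemma pv_foldl_rowset {β : Type} (m : Nat) (g : Int → β) (js : List Int)
    (c : List (List β)) :
    js.foldl (fun c j => PySem.List.pySetD c (m : Int)
        (PySem.List.pySetD (PySem.List.pyGetD c (m : Int) []) j (g j))) c
      = PySem.List.pySetD c (m : Int)
          (js.foldl (fun r j => PySem.List.pySetD r j (g j))
            (PySem.List.pyGetD c (m : Int) [])) := by
  induction js generalizing c with
  | nil =>
    simp only [List.foldl_nil, PySem.List.pySetD_natCast, PySem.List.pyGetD_natCast]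
    by_cases hm : m < c.length
    · rw [List.getD_eq_getElem c [] hm, List.set_getElem_self]
    · rw [List.set_eq_of_length_le (by omega)]
  | cons j js ih =>
    simp only [List.foldl_cons, PySem.List.pySetD_natCast, PySem.List.pyGetD_natCast] at *
    rw [ih]
    by_cases hm : m < c.length
    · rw [List.getD_eq_getElem (c.set m _) [] (by simpa using hm), List.getElem_set_self,
        List.set_set, List.getD_eq_getElem c [] hm]
    · have hc : ∀ x : List β, c.set m x = c := fun x => List.set_eq_of_length_le (by omega)
      simp only [hc]

lemma pv_copiar_eq (imagen : List (List (Int × Int × Int))) :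
    copiar_imagen imagen = imagen := by
  unfold copiar_imagen
  rw [PySem.List.foldl_append_singleton_eq_map, PySem.List.map_pyGetD_pyRange_zero]
  simp

-- the per-pixel value A computes, with the max already applied
def pvNuevoA (imagen : List (List (Int × Int × Int))) (i j : Int) : Int × Int × Int :=
  let rgb := pvPixelA imagen i j
  (max rgb.1 0, max rgb.2.1 0, max rgb.2.2 0)

-- the per-pixel value B computes
def pvPixB (imagen : List (List (Int × Int × Int))) (i j : Int) : Int × Int × Int :=
  let cols := pvColSums (PySem.List.pyGetD imagen (i - 1) [])
    (PySem.List.pyGetD imagen i []) (PySem.List.pyGetD imagen (i + 1) [])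
  let c0 := PySem.List.pyGetD cols (j - 1) (0, 0, 0)
  let c1 := PySem.List.pyGetD cols j (0, 0, 0)
  let c2 := PySem.List.pyGetD cols (j + 1) (0, 0, 0)
  let m := PySem.List.pyGetD (PySem.List.pyGetD imagen i []) j (0, 0, 0)
  (max (10 * m.1 - (c0.1 + c1.1 + c2.1)) 0,
   max (10 * m.2.1 - (c0.2.1 + c1.2.1 + c2.2.1)) 0,
   max (10 * m.2.2 - (c0.2.2 + c1.2.2 + c2.2.2)) 0)

-- A in map-normal form
lemma pv_A_norm (imagen : List (List (Int × Int × Int))) :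
    sharpening imagen
      = imagen.mapIdx (fun i x =>
          if 1 ≤ (i : Int) ∧ (i : Int) < PySem.List.len imagen - 1 then
            x.mapIdx (fun j y =>
              if 1 ≤ (j : Int) ∧ (j : Int) < PySem.List.len (PySem.List.pyGetD imagen 0 []) - 1 then
                pvNuevoA imagen i j
              else y)
          else x) := by
  show (PySem.List.pyRange 1 (PySem.List.len imagen - 1) 1).foldl (fun copia i =>
      (PySem.List.pyRange 1 (PySem.List.len (PySem.List.pyGetD imagen 0 []) - 1) 1).foldl
        (fun copia j =>
          PySem.List.pySetD copia i
            (PySem.List.pySetD (PySem.List.pyGetD copia i []) j (pvNuevoA imagen i j)))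
        copia) (copiar_imagen imagen) = _
  rw [pv_copiar_eq]
  refine Eq.trans (PySem.List.foldl_congr_mem _ _
    (fun c i => PySem.List.pySetD c i
      ((PySem.List.pyRange 1 (PySem.List.len (PySem.List.pyGetD imagen 0 []) - 1) 1).foldl
        (fun r j => PySem.List.pySetD r j (pvNuevoA imagen i j))
        (PySem.List.pyGetD c i []))) _ ?_) ?_
  · intro acc i hi
    have h1 : 1 ≤ i := (PySem.List.mem_pyRange_one.mp hi).1
    obtain ⟨m, rfl⟩ : ∃ m : Nat, i = (m : Int) := ⟨i.toNat, by omega⟩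
    exact pv_foldl_rowset m (fun j => pvNuevoA imagen (m : Int) j) _ acc
  refine Eq.trans (pv_foldl_update []
    (fun i r => (PySem.List.pyRange 1 (PySem.List.len (PySem.List.pyGetD imagen 0 []) - 1) 1).foldl
      (fun r j => PySem.List.pySetD r j (pvNuevoA imagen i j)) r)
    (PySem.List.len imagen - 1) imagen 1 (by norm_num)) ?_
  refine congrArg (fun f => imagen.mapIdx f) (funext fun i => funext fun x => ?_)
  by_cases hc : 1 ≤ (i : Int) ∧ (i : Int) < PySem.List.len imagen - 1
  · rw [if_pos hc, if_pos hc]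
    exact pv_foldl_update (0, 0, 0) (fun j _ => pvNuevoA imagen i j)
      (PySem.List.len (PySem.List.pyGetD imagen 0 []) - 1) x 1 (by norm_num)
  · rw [if_neg hc, if_neg hc]

-- B in map-normal form
lemma pv_B_norm (imagen : List (List (Int × Int × Int))) :
    sharpening_alt imagen
      = imagen.mapIdx (fun i x =>
          if 1 ≤ (i : Int) ∧ (i : Int) < PySem.List.len imagen - 1 then
            x.mapIdx (fun j y =>
              if 1 ≤ (j : Int) ∧ (j : Int) < PySem.List.len (PySem.List.pyGetD imagen 0 []) - 1 then
                pvPixB imagen i j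
              else y)
          else x) := by
  show (PySem.List.pyRange 1 (PySem.List.len imagen - 1) 1).foldl (fun salida i =>
      PySem.List.pySetD salida i
        ((PySem.List.pyRange 1 (PySem.List.len (PySem.List.pyGetD imagen 0 []) - 1) 1).foldl
          (fun fila j => PySem.List.pySetD fila j (pvPixB imagen i j))
          (PySem.List.pyGetD salida i []))) (imagen.map (fun fila => fila)) = _
  rw [show imagen.map (fun fila => fila) = imagen from List.map_id' imagen]
  refine Eq.trans (pv_foldl_update []
    (fun i r => (PySem.List.pyRange 1 (PySem.List.len (PySem.List.pyGetD imagen 0 []) - 1) 1).foldl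
      (fun r j => PySem.List.pySetD r j (pvPixB imagen i j)) r)
    (PySem.List.len imagen - 1) imagen 1 (by norm_num)) ?_
  refine congrArg (fun f => imagen.mapIdx f) (funext fun i => funext fun x => ?_)
  by_cases hc : 1 ≤ (i : Int) ∧ (i : Int) < PySem.List.len imagen - 1
  · rw [if_pos hc, if_pos hc]
    exact pv_foldl_update (0, 0, 0) (fun j _ => pvPixB imagen i j)
      (PySem.List.len (PySem.List.pyGetD imagen 0 []) - 1) x 1 (by norm_num)
  · rw [if_neg hc, if_neg hc]

-- on interior pixels of a wide-enough image the two per-pixel values agree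
lemma pv_pixel_eq (imagen : List (List (Int × Int × Int))) (i j : Nat)
    (hlen : ∀ fila ∈ imagen, (imagen.getD 0 []).length ≤ fila.length)
    (hi1 : 1 ≤ i) (hi2 : (i : Int) < imagen.length - 1)
    (hj1 : 1 ≤ j) (hj2 : (j : Int) < ((imagen.getD 0 []).length : Int) - 1) :
    pvNuevoA imagen (i : Int) (j : Int) = pvPixB imagen (i : Int) (j : Int) := by
  have hR : PySem.List.pyRange (-1) 2 1 = [-1, 0, 1] := by decide
  simp only [pvNuevoA, pvPixelA, pvPixB, hR, List.foldl_cons, List.foldl_nil]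
  norm_num
  have m0 : PySem.List.pyGetD pvMascara 0 [] = [-1, -1, -1] := by decide
  have m1 : PySem.List.pyGetD pvMascara 1 [] = [-1, 9, -1] := by decide
  have m2 : PySem.List.pyGetD pvMascara 2 [] = [-1, -1, -1] := by decide
  have n0 : PySem.List.pyGetD ([-1, -1, -1] : List Int) 0 0 = -1 := by decide
  have n1 : PySem.List.pyGetD ([-1, -1, -1] : List Int) 1 0 = -1 := by decide
  have n2 : PySem.List.pyGetD ([-1, -1, -1] : List Int) 2 0 = -1 := by decide
  have k0 : PySem.List.pyGetD ([-1, 9, -1] : List Int) 0 0 = -1 := by decide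
  have k1 : PySem.List.pyGetD ([-1, 9, -1] : List Int) 1 0 = 9 := by decide
  have k2 : PySem.List.pyGetD ([-1, 9, -1] : List Int) 2 0 = -1 := by decide
  simp only [m0, m1, m2, n0, n1, n2, k0, k1, k2]
  have c0 : ((i : Int) + -1) = ((i - 1 : Nat) : Int) := by omega
  have c0' : ((j : Int) + -1) = ((j - 1 : Nat) : Int) := by omega
  have c1 : ((i : Int) - 1) = ((i - 1 : Nat) : Int) := by omega
  have c2 : ((i : Int) + 1) = ((i + 1 : Nat) : Int) := by omega
  have c3 : ((j : Int) - 1) = ((j - 1 : Nat) : Int) := by omega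
  have c4 : ((j : Int) + 1) = ((j + 1 : Nat) : Int) := by omega
  rw [c0, c0', c1, c2, c3, c4]
  simp only [PySem.List.pyGetD_natCast, List.getD_eq_getElem?_getD]
  have him : i - 1 < imagen.length := by omega
  have hi0 : i < imagen.length := by omega
  have hip : i + 1 < imagen.length := by omega
  have e0 : imagen[i - 1]?.getD ([] : List (Int × Int × Int)) = imagen[i - 1] := by
    rw [List.getElem?_eq_getElem him]; rfl
  have e1 : imagen[i]?.getD ([] : List (Int × Int × Int)) = imagen[i] := by
    rw [List.getElem?_eq_getElem hi0]; rfl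
  have e2 : imagen[i + 1]?.getD ([] : List (Int × Int × Int)) = imagen[i + 1] := by
    rw [List.getElem?_eq_getElem hip]; rfl
  rw [e0, e1, e2]
  have ha0 : (imagen.getD 0 []).length ≤ imagen[i - 1].length := hlen _ (List.getElem_mem him)
  have ha1 : (imagen.getD 0 []).length ≤ imagen[i].length := hlen _ (List.getElem_mem hi0)
  have ha2 : (imagen.getD 0 []).length ≤ imagen[i + 1].length := hlen _ (List.getElem_mem hip)
  have hcol : ∀ k : Nat, k < (imagen.getD 0 []).length →
      (pvColSums imagen[i - 1] imagen[i] imagen[i + 1])[k]?.getD ((0 : Int), (0 : Int), (0 : Int))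
        = ((imagen[i - 1][k]?.getD (0, 0, 0)).1 + (imagen[i][k]?.getD (0, 0, 0)).1
              + (imagen[i + 1][k]?.getD (0, 0, 0)).1,
           (imagen[i - 1][k]?.getD (0, 0, 0)).2.1 + (imagen[i][k]?.getD (0, 0, 0)).2.1
              + (imagen[i + 1][k]?.getD (0, 0, 0)).2.1,
           (imagen[i - 1][k]?.getD (0, 0, 0)).2.2 + (imagen[i][k]?.getD (0, 0, 0)).2.2
              + (imagen[i + 1][k]?.getD (0, 0, 0)).2.2) := by
    intro k hk
    have hk0 : k < imagen[i - 1].length := by omega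
    have hk1 : k < imagen[i].length := by omega
    have hk2 : k < imagen[i + 1].length := by omega
    have hkc : k < (pvColSums imagen[i - 1] imagen[i] imagen[i + 1]).length := by
      simp [pvColSums]; omega
    rw [List.getElem?_eq_getElem hkc, List.getElem?_eq_getElem hk0,
      List.getElem?_eq_getElem hk1, List.getElem?_eq_getElem hk2]
    simp [pvColSums, List.getElem_zip]
  rw [hcol (j - 1) (by omega), hcol j (by omega), hcol (j + 1) (by omega)]
  refine ⟨?_, ?_, ?_⟩ <;> (congr 1; ring)


-- ===== VERDICT (by name: the statement is the Claim_ definition above) =====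
theorem sharpening_spec : Claim_equal_sharpening := by
  intro imagen _ hpre
  unfold Spec_sharpening
  rw [pv_A_norm, pv_B_norm]
  refine congrArg (fun f => imagen.mapIdx f) (funext fun i => funext fun x => ?_)
  by_cases hc : 1 ≤ (i : Int) ∧ (i : Int) < PySem.List.len imagen - 1
  · rw [if_pos hc, if_pos hc]
    refine congrArg (fun f => x.mapIdx f) (funext fun j => funext fun y => ?_)
    by_cases hcj : 1 ≤ (j : Int) ∧ (j : Int) < PySem.List.len (PySem.List.pyGetD imagen 0 []) - 1
    · rw [if_pos hcj, if_pos hcj]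
      have hlen := hpre.2
      simp only [PySem.List.len_eq, PySem.List.pyGetD_zero] at hc hcj
      exact pv_pixel_eq imagen i j
        (hlen ⟨by omega, by omega⟩) (by omega) (by omega) (by omega) (by omega)
    · rw [if_neg hcj, if_neg hcj]
  · rw [if_neg hc, if_neg hc]
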